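-- pv_equiv track=rewrite | github.com/pglen/pyedpro | pyedlib/pedutil.py | rmlspace
-- ===== SOURCE A (Python) =====
-- def rmlspace(strx, num):
--     idx = 0;    xlen = len(strx)
--     while True:
--         if idx >= xlen:  break
--         if strx[idx] != " ": break
--         if idx >= num: break
--         idx += 1
--     return strx[idx:]
-- ===== SOURCE B (Python) =====
-- def rmlspace(strx, num):
--     lead = len(strx) - len(strx.lstrip(' '))
--     k = max(0, min(num, lead))
--     return strx[k:]
-- ===== Notes on version B (the rewrite author's own statement) =====
-- stated objective: simpler
-- what changed: Replaces the index loop with three break conditions by computing the leading-space count via lstrip, clamping it with min/max against num, and taking one slice.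
import Mathlib
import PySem

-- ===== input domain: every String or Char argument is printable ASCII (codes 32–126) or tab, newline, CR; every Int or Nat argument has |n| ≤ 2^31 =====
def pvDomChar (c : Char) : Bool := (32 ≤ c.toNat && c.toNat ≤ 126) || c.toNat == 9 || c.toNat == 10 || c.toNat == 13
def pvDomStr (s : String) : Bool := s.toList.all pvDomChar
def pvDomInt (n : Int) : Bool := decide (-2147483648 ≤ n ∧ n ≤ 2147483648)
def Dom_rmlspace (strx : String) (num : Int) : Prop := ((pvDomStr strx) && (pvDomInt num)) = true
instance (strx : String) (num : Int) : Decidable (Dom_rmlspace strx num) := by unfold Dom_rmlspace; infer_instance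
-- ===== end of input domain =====

-- B replaces A's index loop (three break conditions) by a clamped leading-space count and one slice; objective: simpler.


-- ===== PORT A =====
-- the while-True loop: advances idx until one of the three break conditions fires
def rmlspaceLoop (cs : List Char) (num : Int) (idx : Int) : Int :=
  match cs with
  | [] => idx                                   -- idx >= xlen: break
  | c :: rest =>
    if c ≠ ' ' then idx                         -- strx[idx] != " ": break
    else if num ≤ idx then idx                  -- idx >= num: break
    else rmlspaceLoop rest num (idx + 1)

def rmlspace (strx : String) (num : Int) : String :=
  String.ofList (PySem.Chars.slice strx.toList (some (rmlspaceLoop strx.toList num 0)) none)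

-- ===== PORT B =====
-- strx.lstrip(' ') ported by hand as dropWhile (· == ' '): exact for a single-space strip set
def rmlspace_alt (strx : String) (num : Int) : String :=
  let lead : Int := (strx.toList.length : Int) - ((strx.toList.dropWhile (· == ' ')).length : Int)
  let k : Int := max 0 (min num lead)
  String.ofList (PySem.Chars.slice strx.toList (some k) none)

-- ===== PRECONDITION & SPEC =====
def Spec_rmlspace (strx : String) (num : Int) (out : String) : Prop := out = rmlspace_alt strx num
instance (strx : String) (num : Int) (out : String) : Decidable (Spec_rmlspace strx num out) := by unfold Spec_rmlspace; infer_instance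

-- ===== CLAIM (what is proved, stated in full; the proofs are below) =====
def Claim_equal_rmlspace : Prop := ∀ (strx : String) (num : Int), Dom_rmlspace strx num → Spec_rmlspace strx num (rmlspace strx num)

-- ===== LEMMAS AND PROOFS =====

-- A's loop computes idx + min(leading-space count of cs, max 0 (num - idx))
theorem rmlspaceLoop_eq (cs : List Char) (num : Int) (idx : Int) :
    rmlspaceLoop cs num idx = idx + min ((cs.takeWhile (· == ' ')).length : Int) (max 0 (num - idx)) := by
  induction cs generalizing idx with
  | nil => simp [rmlspaceLoop]
  | cons c rest ih =>
    by_cases hc : c = ' '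
    · subst hc
      by_cases hn : num ≤ idx
      · simp [rmlspaceLoop, hn]
        omega
      · simp [rmlspaceLoop, hn, ih]
        omega
    · simp [rmlspaceLoop, hc]

theorem takeWhile_dropWhile_len (cs : List Char) (p : Char → Bool) :
    (cs.takeWhile p).length + (cs.dropWhile p).length = cs.length := by
  conv_rhs => rw [← List.takeWhile_append_dropWhile (p := p) (l := cs)]
  rw [List.length_append]

-- ===== VERDICT (by name: the statement is the Claim_ definition above) =====
theorem rmlspace_spec : Claim_equal_rmlspace := by
  intro strx num _
  unfold Spec_rmlspace rmlspace rmlspace_alt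
  rw [rmlspaceLoop_eq]
  have h := takeWhile_dropWhile_len strx.toList (· == ' ')
  congr 3
  omega
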